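-- pv_equiv track=rewrite | github.com/whym1here/basic-dsalgo | dsa/10/code.py | fast_sol
-- ===== SOURCE A (Python) =====
-- def fast_sol(n : int, k : int) -> int:
--     dp = [0 for i in range(n+1)]
--     presum = [0 for i in range(n+1)]
--
--     dp[0] = 1
--     presum[0] = dp[0]
--
--     for i in range(1, n+1):
--         if(i-k-1 < 0):
--             dp[i] = presum[i-1]
--             presum[i] = presum[i-1] + dp[i]
--         else:
--             dp[i] = presum[i-1] - presum[i-k-1]
--             presum[i] = presum[i-1] + dp[i]
--
--     return dp[n]
-- ===== SOURCE B (Python) =====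
-- def fast_sol(n: int, k: int) -> int:
--     # Telescoped recurrence: since dp[i] is the sum of the k previous dp values,
--     # dp[i] - dp[i-1] = dp[i-1] - dp[i-k-1], i.e. dp[i] = 2*dp[i-1] - dp[i-k-1].
--     dp = [0] * (n + 1)
--     dp[0] = 1
--     if n >= 1:
--         dp[1] = 1 if k >= 1 else 0
--     for i in range(2, n + 1):
--         back = dp[i - k - 1] if i - k - 1 >= 0 else 0
--         dp[i] = 2 * dp[i - 1] - back
--     return dp[n]
-- ===== Notes on version B (the rewrite author's own statement) =====
-- stated objective: alternative
-- what changed: Replaced the two-array prefix-sum DP (dp[i] = presum[i-1] - presum[i-k-1]) by the telescoped second-order recurrence dp[i] = 2*dp[i-1] - dp[i-k-1] over a single dp array, eliminating the prefix-sum table entirely.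
-- intended difference: For k = -1 and n >= 1, A reads presum[i-k-1] = presum[i] before it has been written (a stale zero) and so returns 2^(n-1); B returns 0, the intended count for a window of no previous terms. — e.g. on fast_sol(1, -1): A returns 1, B returns 0
import Mathlib
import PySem

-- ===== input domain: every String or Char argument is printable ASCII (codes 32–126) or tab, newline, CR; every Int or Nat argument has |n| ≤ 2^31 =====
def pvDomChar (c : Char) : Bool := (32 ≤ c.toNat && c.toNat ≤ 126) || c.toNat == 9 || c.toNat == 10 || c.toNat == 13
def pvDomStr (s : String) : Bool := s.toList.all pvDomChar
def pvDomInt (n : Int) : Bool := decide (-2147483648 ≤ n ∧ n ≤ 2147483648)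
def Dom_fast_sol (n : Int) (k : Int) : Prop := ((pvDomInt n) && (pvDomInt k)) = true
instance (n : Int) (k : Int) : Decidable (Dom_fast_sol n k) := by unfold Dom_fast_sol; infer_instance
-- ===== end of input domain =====

-- B drops the prefix-sum table and uses the telescoped second-order recurrence
-- dp[i] = 2*dp[i-1] - dp[i-k-1] over a single dp array.

-- ===== PORT A =====
-- one iteration of A's loop body; on every Pre_ input all indices lie in [0, n],
-- so `.toNat` with `List.set`/`List.getD` is exact for Python's indexing here.
def fastSolStepA (k : Int) (s : List Int × List Int) (i : Int) : List Int × List Int :=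
  if i - k - 1 < 0 then
    let dp := s.1.set i.toNat (s.2.getD (i-1).toNat 0)
    (dp, s.2.set i.toNat (s.2.getD (i-1).toNat 0 + dp.getD i.toNat 0))
  else
    let dp := s.1.set i.toNat (s.2.getD (i-1).toNat 0 - s.2.getD (i-k-1).toNat 0)
    (dp, s.2.set i.toNat (s.2.getD (i-1).toNat 0 + dp.getD i.toNat 0))

def fast_sol (n : Int) (k : Int) : Int :=
  let dp := (List.replicate (n+1).toNat (0:Int)).set 0 1
  let presum := (List.replicate (n+1).toNat (0:Int)).set 0 (dp.getD 0 0)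
  let s := (PySem.List.pyRange 1 (n+1) 1).foldl (fastSolStepA k) (dp, presum)
  s.1.getD n.toNat 0

-- ===== PORT B =====
-- one iteration of B's loop body: dp[i] = 2*dp[i-1] - back
def fastSolStepB (k : Int) (dp : List Int) (i : Int) : List Int :=
  let back := if 0 ≤ i - k - 1 then dp.getD (i-k-1).toNat 0 else 0
  dp.set i.toNat (2 * dp.getD (i-1).toNat 0 - back)

def fast_sol_alt (n : Int) (k : Int) : Int :=
  let dp0 := (List.replicate (n+1).toNat (0:Int)).set 0 1
  let dp1 := if 1 ≤ n then dp0.set 1 (if 1 ≤ k then 1 else 0) else dp0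
  let dp := (PySem.List.pyRange 2 (n+1) 1).foldl (fastSolStepB k) dp1
  dp.getD n.toNat 0

-- ===== PRECONDITION & SPEC =====
-- Pre_ excludes exactly the inputs where A raises IndexError: n < 0 (dp[0] = 1 on an
-- empty list), and k ≤ -2 with n ≥ 1 (presum[i-k-1] is read past the end of the list).
def Pre_fast_sol (n : Int) (k : Int) : Prop := 0 ≤ n ∧ (-1 ≤ k ∨ n = 0)
instance (n : Int) (k : Int) : Decidable (Pre_fast_sol n k) := by unfold Pre_fast_sol; infer_instance
def pvWitness_fast_sol : Int × Int := (3, 2)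

-- For k = -1 and n ≥ 1, A reads presum[i-k-1] = presum[i] before it has been written
-- (a stale zero) and so returns 2^(n-1); B returns 0, the intended count for a window
-- of no previous terms.
def D_fast_sol (n : Int) (k : Int) : Prop := k = -1 ∧ 1 ≤ n
instance (n : Int) (k : Int) : Decidable (D_fast_sol n k) := by unfold D_fast_sol; infer_instance

def Spec_fast_sol (n : Int) (k : Int) (out : Int) : Prop := ¬ D_fast_sol n k → out = fast_sol_alt n k
instance (n : Int) (k : Int) (out : Int) : Decidable (Spec_fast_sol n k out) := by unfold Spec_fast_sol; infer_instance

def pvDiffWitness_fast_sol : Int × Int := (1, -1)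
def pvDiffWitnessOut_fast_sol : Int × Int := (1, 0)

-- ===== CLAIM (what is proved, stated in full; the proofs are below) =====
def Claim_unchanged_fast_sol : Prop := ∀ (n : Int) (k : Int), Dom_fast_sol n k → Pre_fast_sol n k → Spec_fast_sol n k (fast_sol n k)
def Claim_exact_fast_sol : Prop := ∀ (n : Int) (k : Int), Dom_fast_sol n k → Pre_fast_sol n k → D_fast_sol n k → fast_sol n k ≠ fast_sol_alt n k
def Claim_changed_fast_sol : Prop := Dom_fast_sol (pvDiffWitness_fast_sol.1) (pvDiffWitness_fast_sol.2) ∧ Pre_fast_sol (pvDiffWitness_fast_sol.1) (pvDiffWitness_fast_sol.2) ∧ D_fast_sol (pvDiffWitness_fast_sol.1) (pvDiffWitness_fast_sol.2) ∧ fast_sol (pvDiffWitness_fast_sol.1) (pvDiffWitness_fast_sol.2) = pvDiffWitnessOut_fast_sol.1 ∧ fast_sol_alt (pvDiffWitness_fast_sol.1) (pvDiffWitness_fast_sol.2) = pvDiffWitnessOut_fast_sol.2 ∧ pvDiffWitnessOut_fast_sol.1 ≠ pvDiffWitnessOut_fast_sol.2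

-- ===== LEMMAS AND PROOFS =====

lemma pv_getD_set_eq (xs : List Int) (i : Nat) (v d : Int) (h : i < xs.length) :
    (xs.set i v).getD i d = v := by
  simp [List.getD_eq_getElem?_getD, List.getElem?_set_self h]

lemma pv_getD_set_ne (xs : List Int) (i j : Nat) (v d : Int) (h : i ≠ j) :
    (xs.set i v).getD j d = xs.getD j d := by
  simp [List.getD_eq_getElem?_getD, List.getElem?_set_ne h]

-- invariant after both loops have processed i = 1..m (k ≥ 0, 1 ≤ m ≤ n):
-- a = A's (dp, presum), b = B's dp array; dp arrays agree up to m, presum satisfies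
-- its running-sum recurrence, each dp entry carries A's branch characterisation,
-- and everything beyond m is still the 0 fill.
def pvInvAB (n k : Int) (m : Nat) (a : List Int × List Int) (b : List Int) : Prop :=
  a.1.length = (n+1).toNat ∧ a.2.length = (n+1).toNat ∧ b.length = (n+1).toNat ∧
  a.1.getD 0 0 = 1 ∧ a.2.getD 0 0 = 1 ∧ b.getD 0 0 = 1 ∧
  (∀ t : Nat, t ≤ m → a.1.getD t 0 = b.getD t 0) ∧
  (∀ t : Nat, 1 ≤ t → t ≤ m → a.2.getD t 0 = a.2.getD (t-1) 0 + a.1.getD t 0) ∧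
  (∀ t : Nat, 1 ≤ t → t ≤ m →
    a.1.getD t 0 = if (t:Int) - k - 1 < 0 then a.2.getD (t-1) 0
                   else a.2.getD (t-1) 0 - a.2.getD ((t:Int)-k-1).toNat 0) ∧
  (∀ t : Nat, m < t → t < (n+1).toNat → a.1.getD t 0 = 0 ∧ a.2.getD t 0 = 0 ∧ b.getD t 0 = 0)

lemma pv_step (n k : Int) (hk : 0 ≤ k) (m : Nat) (hm0 : 1 ≤ m) (hm1 : m + 1 < (n+1).toNat)
    (a : List Int × List Int) (b : List Int) (h : pvInvAB n k m a b) :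
    pvInvAB n k (m+1) (fastSolStepA k a ((m:Int)+1)) (fastSolStepB k b ((m:Int)+1)) := by
  obtain ⟨hl1, hl2, hlb, hd0, hp0, hb0, hE, hR, hC, hZ⟩ := h
  have e1 : ((m:Int)+1).toNat = m + 1 := by omega
  have e2 : ((m:Int)+1-1).toNat = m := by omega
  -- A's new dp value
  set x : Int := (if ((m:Int)+1) - k - 1 < 0 then a.2.getD m 0
      else a.2.getD m 0 - a.2.getD (((m:Int)+1)-k-1).toNat 0) with hx
  have hA : fastSolStepA k a ((m:Int)+1) =
      (a.1.set (m+1) x, a.2.set (m+1) (a.2.getD m 0 + x)) := by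
    by_cases hc : ((m:Int)+1) - k - 1 < 0
    · simp only [fastSolStepA, if_pos hc, e1, e2]
      rw [pv_getD_set_eq _ _ _ _ (by omega), hx, if_pos hc]
    · simp only [fastSolStepA, if_neg hc, e1, e2]
      rw [pv_getD_set_eq _ _ _ _ (by omega), hx, if_neg hc]
  -- B's new dp value
  set y : Int := 2 * b.getD m 0 -
      (if 0 ≤ ((m:Int)+1) - k - 1 then b.getD (((m:Int)+1)-k-1).toNat 0 else 0) with hy
  have hB : fastSolStepB k b ((m:Int)+1) = b.set (m+1) y := by
    simp only [fastSolStepB, e1, e2, hy]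
  -- the two new values agree
  have hxy : x = y := by
    have hdm := hE m le_rfl
    have hcm := hC m hm0 le_rfl
    by_cases h1 : k ≤ (m:Int) - 1
    · -- m > k : both read a real back value
      have hkt : k.toNat + 1 ≤ m := by omega
      have ei : (((m:Int)+1)-k-1).toNat = m - k.toNat := by omega
      have ec : ((m:Int)-k-1).toNat = m - k.toNat - 1 := by omega
      have hback := hE (m - k.toNat) (by omega)
      have hrec := hR (m - k.toNat) (by omega) (by omega)
      rw [if_neg (by omega)] at hcm
      rw [ec] at hcm
      have hrecm := hR m hm0 le_rfl
      rw [hx, if_neg (by omega), hy, if_pos (by omega), ei, ← hback]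
      omega
    · -- m ≤ k : A's branch depends on m = k or m < k; B's back is dp[0] or absent
      by_cases h2 : (m:Int) = k
      · -- m = k : back index is 0
        have ei : (((m:Int)+1)-k-1).toNat = 0 := by omega
        rw [if_pos (by omega)] at hcm
        have hrecm := hR m hm0 le_rfl
        rw [hx, if_neg (by omega), ei, hy, if_pos (by omega), ei, hb0, hp0, ← hdm]
        omega
      · -- m < k : A takes the then-branch, B has no back term
        rw [if_pos (by omega)] at hcm
        have hrecm := hR m hm0 le_rfl
        rw [hx, if_pos (by omega), hy, if_neg (by omega), ← hdm]
        omega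
  rw [hA, hB, ← hxy]
  refine ⟨by simpa using hl1, by simpa using hl2, by simpa using hlb,
    ?_, ?_, ?_, ?_, ?_, ?_, ?_⟩
  · rw [pv_getD_set_ne _ _ _ _ _ (by omega)]; exact hd0
  · rw [pv_getD_set_ne _ _ _ _ _ (by omega)]; exact hp0
  · rw [pv_getD_set_ne _ _ _ _ _ (by omega)]; exact hb0
  · intro t ht
    rcases Nat.lt_or_ge t (m+1) with hlt | hge
    · rw [pv_getD_set_ne _ _ _ _ _ (by omega), pv_getD_set_ne _ _ _ _ _ (by omega)]
      exact hE t (by omega)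
    · have : t = m + 1 := by omega
      subst this
      rw [pv_getD_set_eq _ _ _ _ (by omega), pv_getD_set_eq _ _ _ _ (by omega)]
  · intro t ht1 ht2
    rcases Nat.lt_or_ge t (m+1) with hlt | hge
    · rw [pv_getD_set_ne _ _ _ _ _ (by omega), pv_getD_set_ne _ _ _ _ _ (by omega),
        pv_getD_set_ne _ _ _ _ _ (by omega)]
      exact hR t ht1 (by omega)
    · have : t = m + 1 := by omega
      subst this
      rw [pv_getD_set_eq _ _ _ _ (by omega), pv_getD_set_eq _ _ _ _ (by omega),
        pv_getD_set_ne _ _ _ _ _ (by omega)]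
      simp
  · intro t ht1 ht2
    rcases Nat.lt_or_ge t (m+1) with hlt | hge
    · rw [pv_getD_set_ne _ _ _ _ _ (by omega), pv_getD_set_ne _ _ _ _ _ (by omega),
        pv_getD_set_ne _ _ _ _ _ (by omega)]
      by_cases hc : (t:Int) - k - 1 < 0
      · rw [if_pos hc]; have := hC t ht1 (by omega); rwa [if_pos hc] at this
      · rw [if_neg hc]; have := hC t ht1 (by omega); rwa [if_neg hc] at this
    · have : t = m + 1 := by omega
      subst this
      rw [pv_getD_set_eq _ _ _ _ (by omega)]
      have ep : (((m+1:Nat)):Int) = (m:Int)+1 := by push_cast; ring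
      by_cases hc : ((m:Int)+1) - k - 1 < 0
      · rw [ep, if_pos hc, pv_getD_set_ne _ _ _ _ _ (by omega)]
        simp only [Nat.add_sub_cancel]
        rw [hx, if_pos hc]
      · rw [ep, if_neg hc, pv_getD_set_ne _ _ _ _ _ (by omega),
          pv_getD_set_ne _ _ _ _ _ (by omega)]
        simp only [Nat.add_sub_cancel]
        rw [hx, if_neg hc]
  · intro t ht1 ht2
    rw [pv_getD_set_ne _ _ _ _ _ (by omega), pv_getD_set_ne _ _ _ _ _ (by omega),
      pv_getD_set_ne _ _ _ _ _ (by omega)]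
    exact hZ t (by omega) (by omega)

-- the initial arrays, named for readability of the fold lemma
def pvInitA (n : Int) : List Int × List Int :=
  ((List.replicate (n+1).toNat (0:Int)).set 0 1,
   (List.replicate (n+1).toNat (0:Int)).set 0
     (((List.replicate (n+1).toNat (0:Int)).set 0 1).getD 0 0))

def pvInitB (n k : Int) : List Int :=
  ((List.replicate (n+1).toNat (0:Int)).set 0 1).set 1 (if 1 ≤ k then 1 else 0)

lemma pv_replicate_getD (c s : Nat) : (List.replicate c (0:Int)).getD s 0 = 0 := by
  rw [List.getD_eq_getElem?_getD, List.getElem?_replicate]; split <;> rfl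

lemma pv_base (n k : Int) (hk : 0 ≤ k) (hn : 1 ≤ n) :
    pvInvAB n k 1 (fastSolStepA k (pvInitA n) 1) (pvInitB n k) := by
  obtain ⟨s, hs⟩ : ∃ s : Nat, (n+1).toNat = s + 2 := ⟨(n+1).toNat - 2, by omega⟩
  have hdp : (List.replicate (n+1).toNat (0:Int)).set 0 1 = 1 :: 0 :: List.replicate s 0 := by
    rw [hs, List.replicate_succ, List.replicate_succ]; rfl
  have hinit : pvInitA n = (1 :: 0 :: List.replicate s 0, 1 :: 0 :: List.replicate s 0) := by
    unfold pvInitA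
    rw [hdp, List.getD_cons_zero, hdp]
  set v : Int := if (1:Int) - k - 1 < 0 then 1 else 0 with hv
  have hB : pvInitB n k = 1 :: v :: List.replicate s 0 := by
    unfold pvInitB
    rw [hdp]
    have hvk : (if 1 ≤ k then (1:Int) else 0) = v := by
      rw [hv]
      by_cases h1 : 1 ≤ k
      · rw [if_pos h1, if_pos (by omega)]
      · rw [if_neg h1, if_neg (by omega)]
    rw [hvk]
    rfl
  have hA : fastSolStepA k (pvInitA n) 1 =
      (1 :: v :: List.replicate s 0, 1 :: (1+v) :: List.replicate s 0) := by
    rw [hinit]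
    by_cases hc : (1:Int) - k - 1 < 0
    · simp only [fastSolStepA, if_pos hc]
      rw [hv, if_pos hc]
      rfl
    · have hk0 : k = 0 := by omega
      subst hk0
      simp only [fastSolStepA]
      rw [hv]
      norm_num
  rw [hA, hB]
  have hzfill : ∀ (x y : Int) (t : Nat), 2 ≤ t → (x :: y :: List.replicate s (0:Int)).getD t 0 = 0 := by
    intro x y t ht
    obtain ⟨u, hu⟩ : ∃ u, t = u + 2 := ⟨t - 2, by omega⟩
    subst hu
    rw [List.getD_cons_succ, List.getD_cons_succ]
    exact pv_replicate_getD _ _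
  refine ⟨by simp [hs], by simp [hs], by simp [hs], rfl, rfl, rfl, ?_, ?_, ?_, ?_⟩
  · intro t ht
    interval_cases t <;> rfl
  · intro t ht1 ht2
    interval_cases t
    rw [List.getD_cons_succ, List.getD_cons_zero, List.getD_cons_zero, List.getD_cons_succ,
      List.getD_cons_zero]
  · intro t ht1 ht2
    interval_cases t
    rw [List.getD_cons_succ, List.getD_cons_zero]
    by_cases hc : ((1:Nat):Int) - k - 1 < 0
    · rw [if_pos hc, List.getD_cons_zero, hv, if_pos (by push_cast at hc ⊢; omega)]
    · have hk0 : k = 0 := by push_cast at hc; omega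
      subst hk0
      norm_num
      rw [hv]
      norm_num
  · intro t ht1 ht2
    exact ⟨hzfill _ _ t (by omega), hzfill _ _ t (by omega), hzfill _ _ t (by omega)⟩

lemma pv_fold (n k : Int) (hn : 1 ≤ n) (hk : 0 ≤ k) (m : Nat) (hm0 : 1 ≤ m)
    (hm : (m:Int) ≤ n) :
    pvInvAB n k m
      ((PySem.List.pyRange 1 ((m:Int)+1) 1).foldl (fastSolStepA k) (pvInitA n))
      ((PySem.List.pyRange 2 ((m:Int)+1) 1).foldl (fastSolStepB k) (pvInitB n k)) := by
  induction m, hm0 using Nat.le_induction with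
  | base =>
    have hA1 : PySem.List.pyRange 1 (((1:Nat):Int)+1) 1 = [1] := by
      push_cast; exact PySem.List.pyRange_one_singleton 1
    have hB1 : PySem.List.pyRange 2 (((1:Nat):Int)+1) 1 = [] :=
      PySem.List.pyRange_one_eq_nil (by norm_num)
    rw [hA1, hB1]
    simp only [List.foldl_cons, List.foldl_nil]
    exact pv_base n k hk hn
  | succ m hm0 ih =>
    have hcA : (((m+1:Nat)):Int) + 1 = ((m:Int)+1) + 1 := by push_cast; ring
    rw [hcA, PySem.List.pyRange_one_succ_right (by omega : (1:Int) ≤ (m:Int)+1),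
        PySem.List.pyRange_one_succ_right (by omega : (2:Int) ≤ (m:Int)+1)]
    simp only [List.foldl_append, List.foldl_cons, List.foldl_nil]
    exact pv_step n k hk m hm0 (by push_cast at hm; omega) _ _ (ih (by push_cast at hm; omega))

-- ===== k = -1 (the D_ region): A's arrays double, B's dp stays zero =====
def pvInvAm (n : Int) (m : Nat) (a : List Int × List Int) : Prop :=
  a.1.length = (n+1).toNat ∧ a.2.length = (n+1).toNat ∧
  (∀ t : Nat, t ≤ m → a.2.getD t 0 = 2^t) ∧
  (1 ≤ m → a.1.getD m 0 = 2^(m-1)) ∧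
  (∀ t : Nat, m < t → t < (n+1).toNat → a.2.getD t 0 = 0)

lemma pv_stepA_neg (n : Int) (m : Nat) (hm1 : m + 1 < (n+1).toNat)
    (a : List Int × List Int) (h : pvInvAm n m a) :
    pvInvAm n (m+1) (fastSolStepA (-1) a ((m:Int)+1)) := by
  obtain ⟨hl1, hl2, hP, _, hZ⟩ := h
  have e1 : ((m:Int)+1).toNat = m + 1 := by omega
  have e2 : ((m:Int)+1-1).toNat = m := by omega
  have e3 : ((m:Int)+1-(-1)-1).toNat = m + 1 := by omega
  have hA : fastSolStepA (-1) a ((m:Int)+1) =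
      (a.1.set (m+1) (a.2.getD m 0 - a.2.getD (m+1) 0),
       a.2.set (m+1) (a.2.getD m 0 + (a.2.getD m 0 - a.2.getD (m+1) 0))) := by
    simp only [fastSolStepA, if_neg (by omega : ¬ ((m:Int)+1-(-1)-1 < 0)), e1, e2, e3]
    rw [pv_getD_set_eq _ _ _ _ (by omega)]
  rw [hA]
  have hPm : a.2.getD m 0 = 2^m := hP m le_rfl
  have hPm1 : a.2.getD (m+1) 0 = 0 := hZ (m+1) (by omega) (by omega)
  refine ⟨by simpa using hl1, by simpa using hl2, ?_, ?_, ?_⟩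
  · intro t ht
    rcases Nat.lt_or_ge t (m+1) with hlt | hge
    · rw [pv_getD_set_ne _ _ _ _ _ (by omega)]; exact hP t (by omega)
    · have : t = m + 1 := by omega
      subst this
      rw [pv_getD_set_eq _ _ _ _ (by omega), hPm, hPm1]
      ring
  · intro _
    rw [pv_getD_set_eq _ _ _ _ (by omega), hPm, hPm1]
    simp
  · intro t ht1 ht2
    rw [pv_getD_set_ne _ _ _ _ _ (by omega)]
    exact hZ t (by omega) (by omega)

lemma pv_foldA_neg (n : Int) (hn : 1 ≤ n) (m : Nat) (hm : (m:Int) ≤ n) :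
    pvInvAm n m ((PySem.List.pyRange 1 ((m:Int)+1) 1).foldl (fastSolStepA (-1)) (pvInitA n)) := by
  induction m with
  | zero =>
    have hnil : PySem.List.pyRange 1 (((0:Nat):Int)+1) 1 = [] :=
      PySem.List.pyRange_one_eq_nil (by norm_num)
    rw [hnil]
    simp only [List.foldl_nil]
    obtain ⟨s, hs⟩ : ∃ s : Nat, (n+1).toNat = s + 2 := ⟨(n+1).toNat - 2, by omega⟩
    have hdp : (List.replicate (n+1).toNat (0:Int)).set 0 1 = 1 :: 0 :: List.replicate s 0 := by
      rw [hs, List.replicate_succ, List.replicate_succ]; rfl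
    have hinit : pvInitA n = (1 :: 0 :: List.replicate s 0, 1 :: 0 :: List.replicate s 0) := by
      unfold pvInitA
      rw [hdp, List.getD_cons_zero, hdp]
    rw [hinit]
    refine ⟨by simp [hs], by simp [hs], ?_, by omega, ?_⟩
    · intro t ht; interval_cases t; rfl
    · intro t ht1 ht2
      obtain ⟨u, hu⟩ : ∃ u, t = u + 1 := ⟨t - 1, by omega⟩
      subst hu
      rw [List.getD_cons_succ]
      cases u with
      | zero => rfl
      | succ w => rw [List.getD_cons_succ]; exact pv_replicate_getD _ _
  | succ m ih =>
    have hcA : (((m+1:Nat)):Int) + 1 = ((m:Int)+1) + 1 := by push_cast; ring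
    rw [hcA, PySem.List.pyRange_one_succ_right (by omega : (1:Int) ≤ (m:Int)+1)]
    simp only [List.foldl_append, List.foldl_cons, List.foldl_nil]
    exact pv_stepA_neg n m (by push_cast at hm; omega) _ (ih (by push_cast at hm; omega))

def pvInvBm (n : Int) (b : List Int) : Prop :=
  b.length = (n+1).toNat ∧ b.getD 0 0 = 1 ∧ (∀ t : Nat, 1 ≤ t → b.getD t 0 = 0)

lemma pv_stepB_neg (n : Int) (m : Nat) (hm0 : 1 ≤ m) (hm1 : m + 1 < (n+1).toNat)
    (b : List Int) (h : pvInvBm n b) :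
    pvInvBm n (fastSolStepB (-1) b ((m:Int)+1)) := by
  obtain ⟨hl, h0, hz⟩ := h
  have e1 : ((m:Int)+1).toNat = m + 1 := by omega
  have e2 : ((m:Int)+1-1).toNat = m := by omega
  have e3 : ((m:Int)+1-(-1)-1).toNat = m + 1 := by omega
  have hB : fastSolStepB (-1) b ((m:Int)+1) =
      b.set (m+1) (2 * b.getD m 0 - b.getD (m+1) 0) := by
    simp only [fastSolStepB, if_pos (by omega : (0:Int) ≤ (m:Int)+1-(-1)-1), e1, e2, e3]
  rw [hB]
  refine ⟨by simpa using hl, ?_, ?_⟩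
  · rw [pv_getD_set_ne _ _ _ _ _ (by omega)]; exact h0
  · intro t ht
    rcases Nat.lt_or_ge t (m+1) with hlt | hge
    · rw [pv_getD_set_ne _ _ _ _ _ (by omega)]; exact hz t (by omega)
    · rcases Nat.lt_or_ge t (m+2) with hlt2 | hge2
      · have : t = m + 1 := by omega
        subst this
        rw [pv_getD_set_eq _ _ _ _ (by omega), hz m (by omega), hz (m+1) (by omega)]
        ring
      · rw [pv_getD_set_ne _ _ _ _ _ (by omega)]; exact hz t (by omega)

lemma pv_foldB_neg (n : Int) (hn : 1 ≤ n) (m : Nat) (hm0 : 1 ≤ m) (hm : (m:Int) ≤ n) :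
    pvInvBm n ((PySem.List.pyRange 2 ((m:Int)+1) 1).foldl (fastSolStepB (-1)) (pvInitB n (-1))) := by
  induction m, hm0 using Nat.le_induction with
  | base =>
    have hnil : PySem.List.pyRange 2 (((1:Nat):Int)+1) 1 = [] :=
      PySem.List.pyRange_one_eq_nil (by norm_num)
    rw [hnil]
    simp only [List.foldl_nil]
    obtain ⟨s, hs⟩ : ∃ s : Nat, (n+1).toNat = s + 2 := ⟨(n+1).toNat - 2, by omega⟩
    have hdp : (List.replicate (n+1).toNat (0:Int)).set 0 1 = 1 :: 0 :: List.replicate s 0 := by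
      rw [hs, List.replicate_succ, List.replicate_succ]; rfl
    have hB : pvInitB n (-1) = 1 :: 0 :: List.replicate s 0 := by
      unfold pvInitB
      rw [hdp, if_neg (by omega : ¬ (1:Int) ≤ -1)]
      rfl
    rw [hB]
    refine ⟨by simp [hs], rfl, ?_⟩
    · intro t ht
      obtain ⟨u, hu⟩ : ∃ u, t = u + 1 := ⟨t - 1, by omega⟩
      subst hu
      rw [List.getD_cons_succ]
      cases u with
      | zero => rfl
      | succ w => rw [List.getD_cons_succ]; exact pv_replicate_getD _ _
  | succ m hm0 ih =>
    have hcB : (((m+1:Nat)):Int) + 1 = ((m:Int)+1) + 1 := by push_cast; ring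
    rw [hcB, PySem.List.pyRange_one_succ_right (by omega : (2:Int) ≤ (m:Int)+1)]
    simp only [List.foldl_append, List.foldl_cons, List.foldl_nil]
    exact pv_stepB_neg n m hm0 (by push_cast at hm; omega) _ (ih (by push_cast at hm; omega))

-- ===== VERDICT (by name: the statements are the Claim_ definitions above) =====
theorem fast_sol_spec : Claim_unchanged_fast_sol := by
  intro n k _ hpre
  obtain ⟨hn, hco⟩ := hpre
  intro hd
  by_cases hn0 : n = 0
  · subst hn0
    have hA : PySem.List.pyRange 1 ((0:Int)+1) 1 = [] :=
      PySem.List.pyRange_one_eq_nil (by omega)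
    have hB : PySem.List.pyRange 2 ((0:Int)+1) 1 = [] :=
      PySem.List.pyRange_one_eq_nil (by omega)
    simp [fast_sol, fast_sol_alt]
  · have hk : 0 ≤ k := by
      rcases hco with hk1 | h0
      · rcases lt_or_ge k 0 with hneg | hpos
        · exfalso; exact hd ⟨by omega, by omega⟩
        · exact hpos
      · exact absurd h0 hn0
    have h := pv_fold n k (by omega) hk n.toNat (by omega) (by omega)
    have hc1 : ((n.toNat:Nat):Int) + 1 = n + 1 := by omega
    rw [hc1] at h
    obtain ⟨_, _, _, _, _, _, hE, _, _, _⟩ := h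
    have hgoal := hE n.toNat le_rfl
    simp only [fast_sol, fast_sol_alt, pvInitA, pvInitB] at *
    rw [if_pos (by omega : (1:Int) ≤ n)]
    exact hgoal

theorem fast_sol_changed : Claim_changed_fast_sol := by
  unfold Claim_changed_fast_sol; decide

theorem fast_sol_tight : Claim_exact_fast_sol := by
  intro n k _ hpre hd
  obtain ⟨hn, _⟩ := hpre
  obtain ⟨hk1, hn1⟩ := hd
  subst hk1
  have hA := pv_foldA_neg n hn1 n.toNat (by omega)
  have hB := pv_foldB_neg n hn1 n.toNat (by omega) (by omega)
  have hc1 : ((n.toNat:Nat):Int) + 1 = n + 1 := by omega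
  rw [hc1] at hA hB
  obtain ⟨_, _, _, hdpn, _⟩ := hA
  obtain ⟨_, _, hBz⟩ := hB
  simp only [pvInitA] at hdpn
  simp only [pvInitB] at hBz
  simp only [fast_sol, fast_sol_alt, ne_eq]
  rw [if_pos (by omega : (1:Int) ≤ n), hdpn (by omega), hBz n.toNat (by omega)]
  exact pow_ne_zero _ (by norm_num)
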